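-- pv_equiv track=rewrite | github.com/RuthraVed/hackerearth-practice-solutions | hackerearth-practice-solutions/average_subarray.py | authors_average_subarray
-- ===== SOURCE A (Python) =====
-- def authors_average_subarray(arr, N, K):
--     sum_bits = ans = 0
--     for current_value in arr:
--         # If current value is 1.
--         if current_value == "1":
--             sum_bits += 1
--
--             # If sum of bits is equal to K,
--             # it is same a finding average of sum for K bits.
--             if sum_bits == K:
--                 ans += 1
--                 sum_bits = 0    # Reset sum_bits
--         else:
--             # Else if current value is not 1.
--             sum_bits = 0 # Reset sum_bits
--     return ans
-- ===== SOURCE B (Python) =====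
-- def authors_average_subarray(arr, N, K):
--     if K <= 0:
--         return 0
--     # collect lengths of maximal runs of "1"
--     runs = []
--     length = 0
--     for v in arr:
--         if v == "1":
--             length += 1
--         else:
--             if length != 0:
--                 runs.append(length)
--             length = 0
--     if length != 0:
--         runs.append(length)
--     return sum(L // K for L in runs)
-- ===== Notes on version B (the rewrite author's own statement) =====
-- stated objective: alternative
-- what changed: B first run-length-encodes the maximal runs of "1" and then sums L // K over the runs (with an explicit K <= 0 guard returning 0), instead of A's in-loop counter that resets every time it reaches K.
import Mathlib
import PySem

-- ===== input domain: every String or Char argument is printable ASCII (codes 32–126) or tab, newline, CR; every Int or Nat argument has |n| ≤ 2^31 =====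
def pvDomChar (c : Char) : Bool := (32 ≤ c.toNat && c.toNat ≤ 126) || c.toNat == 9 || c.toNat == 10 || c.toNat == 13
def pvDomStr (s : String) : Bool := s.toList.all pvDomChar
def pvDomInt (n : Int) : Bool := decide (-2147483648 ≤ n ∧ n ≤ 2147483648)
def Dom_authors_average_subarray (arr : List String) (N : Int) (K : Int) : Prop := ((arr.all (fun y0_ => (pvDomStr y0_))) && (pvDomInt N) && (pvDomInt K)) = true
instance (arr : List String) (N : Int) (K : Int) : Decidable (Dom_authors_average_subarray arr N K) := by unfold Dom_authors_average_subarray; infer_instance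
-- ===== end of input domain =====

-- B run-length-encodes the maximal runs of "1" and sums L // K over the runs (K ≤ 0 guarded to 0),
-- instead of A's in-loop counter resetting at K; alternative decomposition, same O(n) cost.


-- ===== PORT A =====
-- A's loop state is (sum_bits, ans).
def aStep (K : Int) (st : Int × Int) (current_value : String) : Int × Int :=
  if current_value = "1" then
    let s := st.1 + 1
    if s = K then (0, st.2 + 1) else (s, st.2)
  else
    (0, st.2)

def authors_average_subarray (arr : List String) (N : Int) (K : Int) : Int :=
  (arr.foldl (aStep K) (0, 0)).2

-- ===== PORT B =====
-- B's loop state is (runs, length): completed run lengths and the current run length.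
def bStep (p : List Int × Int) (v : String) : List Int × Int :=
  if v = "1" then (p.1, p.2 + 1)
  else if p.2 ≠ 0 then (p.1 ++ [p.2], 0) else (p.1, 0)

-- flush of the trailing run ("if length != 0: runs.append(length)")
def bFinal (st : List Int × Int) : List Int :=
  if st.2 ≠ 0 then st.1 ++ [st.2] else st.1

def authors_average_subarray_alt (arr : List String) (N : Int) (K : Int) : Int :=
  if K ≤ 0 then 0
  else (bFinal (arr.foldl bStep ([], 0))).foldl (fun acc L => acc + PySem.Int.floordiv L K) 0

-- ===== PRECONDITION & SPEC =====
def Spec_authors_average_subarray (arr : List String) (N : Int) (K : Int) (out : Int) : Prop := out = authors_average_subarray_alt arr N K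
instance (arr : List String) (N : Int) (K : Int) (out : Int) : Decidable (Spec_authors_average_subarray arr N K out) := by unfold Spec_authors_average_subarray; infer_instance

-- ===== CLAIM (what is proved, stated in full; the proofs are below) =====
def Claim_equal_authors_average_subarray : Prop := ∀ (arr : List String) (N : Int) (K : Int), Dom_authors_average_subarray arr N K → Spec_authors_average_subarray arr N K (authors_average_subarray arr N K)

-- ===== LEMMAS AND PROOFS =====

-- shorthand for B's summation
def sumdiv (K : Int) (runs : List Int) : Int :=
  runs.foldl (fun acc L => acc + PySem.Int.floordiv L K) 0

theorem sumdiv_foldl (K : Int) (runs : List Int) (a : Int) :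
    runs.foldl (fun acc L => acc + PySem.Int.floordiv L K) a = a + sumdiv K runs := by
  induction runs generalizing a with
  | nil => simp [sumdiv]
  | cons x xs ih =>
    simp only [sumdiv, List.foldl_cons, zero_add]
    rw [ih, ih]; ring

theorem sumdiv_append (K : Int) (xs : List Int) (L : Int) :
    sumdiv K (xs ++ [L]) = sumdiv K xs + PySem.Int.floordiv L K := by
  simp only [sumdiv, List.foldl_append]
  rw [sumdiv_foldl]
  simp [sumdiv]

-- K ≤ 0: A's ans never increments (sum_bits stays ≥ 0 and sum_bits+1 ≥ 1 > K).
theorem aFold_nonpos (K : Int) (hK : K ≤ 0) :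
    ∀ (arr : List String) (s a : Int), 0 ≤ s →
      (arr.foldl (aStep K) (s, a)).2 = a := by
  intro arr
  induction arr with
  | nil => intro s a _; rfl
  | cons v vs ih =>
    intro s a hs
    by_cases hv : v = "1"
    · have hne : ¬ (s + 1 = K) := by omega
      simp only [List.foldl_cons, aStep, hv, if_neg hne]
      exact ih (s + 1) a (by omega)
    · simp only [List.foldl_cons, aStep, if_neg hv]
      exact ih 0 a le_rfl

-- division/mod step facts (ediv/emod, valid for 0 < K)
theorem step_full (K r : Int) (hK : 0 < K) (h : r % K + 1 = K) :
    (r + 1) % K = 0 ∧ (r + 1) / K = r / K + 1 := by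
  have h1 := Int.emod_add_mul_ediv r K
  have hm : K * (r / K + 1) = K * (r / K) + K := by ring
  have h2 : r + 1 = K * (r / K + 1) := by omega
  refine ⟨?_, ?_⟩
  · rw [h2]; simp [Int.mul_emod_right]
  · rw [h2, Int.mul_ediv_cancel_left _ (by omega : K ≠ 0)]

theorem step_part (K r : Int) (hK : 0 < K) (h : ¬ r % K + 1 = K) :
    (r + 1) % K = r % K + 1 ∧ (r + 1) / K = r / K := by
  have hlt : r % K < K := Int.emod_lt_of_pos r hK
  have hge : 0 ≤ r % K := Int.emod_nonneg r (by omega)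
  have h1 := Int.emod_add_mul_ediv r K
  have h2 : r % K + 1 + K * (r / K) = r + 1 := by omega
  have hh := (Int.ediv_emod_unique (a := r + 1) (b := K) (r := r % K + 1) (q := r / K)
    (by omega)).mpr ⟨h2, by omega, by omega⟩
  exact ⟨hh.2, hh.1⟩

-- main invariant: for 0 < K, A's fold from (r % K, a + r / K) equals a plus B's run sums.
theorem key (K : Int) (hK : 0 < K) :
    ∀ (arr : List String) (r a : Int) (runs : List Int), 0 ≤ r →
      (arr.foldl (aStep K) (r % K, a + r / K)).2
        = a + (sumdiv K (arr.foldl bStep (runs, r)).1 - sumdiv K runs)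
            + (arr.foldl bStep (runs, r)).2 / K := by
  intro arr
  induction arr with
  | nil =>
    intro r a runs hr; simp
  | cons v vs ih =>
    intro r a runs hr
    by_cases hv : v = "1"
    · have hB : bStep (runs, r) v = (runs, r + 1) := by simp [bStep, hv]
      by_cases hfull : r % K + 1 = K
      · obtain ⟨hm, hd⟩ := step_full K r hK hfull
        have hA : aStep K (r % K, a + r / K) v = (0, a + r / K + 1) := by
          simp [aStep, hv, hfull]
        have hI := ih (r + 1) a runs (by omega)
        rw [hm, hd] at hI
        rw [List.foldl_cons, List.foldl_cons, hA, hB]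
        rw [show a + r / K + 1 = a + (r / K + 1) from by ring]
        exact hI
      · obtain ⟨hm, hd⟩ := step_part K r hK hfull
        have hA : aStep K (r % K, a + r / K) v = (r % K + 1, a + r / K) := by
          simp [aStep, hv, hfull]
        have hI := ih (r + 1) a runs (by omega)
        rw [hm, hd] at hI
        rw [List.foldl_cons, List.foldl_cons, hA, hB]
        exact hI
    · have hA : aStep K (r % K, a + r / K) v = (0, a + r / K) := by
        simp [aStep, hv]
      by_cases h0 : r ≠ 0
      · have hB : bStep (runs, r) v = (runs ++ [r], 0) := by simp [bStep, hv, h0]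
        have hI := ih 0 (a + r / K) (runs ++ [r]) le_rfl
        simp only [Int.zero_emod, Int.zero_ediv, add_zero] at hI
        rw [List.foldl_cons, List.foldl_cons, hA, hB, hI, sumdiv_append,
          PySem.Int.floordiv_eq_ediv_of_pos hK]
        ring
      · push_neg at h0; subst h0
        have hB : bStep (runs, 0) v = (runs, 0) := by simp [bStep, hv]
        have hA0 : aStep K ((0 : Int), a) v = (0, a) := by simp [aStep, hv]
        have hI := ih 0 a runs le_rfl
        simp only [Int.zero_emod, Int.zero_ediv, add_zero] at hI ⊢
        rw [List.foldl_cons, List.foldl_cons, hA0, hB]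
        exact hI

-- ===== VERDICT (by name: the statement is the Claim_ definition above) =====
theorem authors_average_subarray_spec : Claim_equal_authors_average_subarray := by
  intro arr N K _
  unfold Spec_authors_average_subarray authors_average_subarray authors_average_subarray_alt bFinal
  by_cases hK : K ≤ 0
  · rw [if_pos hK]
    exact aFold_nonpos K hK arr 0 0 le_rfl
  · push_neg at hK
    rw [if_neg (by omega : ¬ K ≤ 0)]
    have h := key K hK arr 0 0 [] le_rfl
    simp only [Int.zero_emod, Int.zero_ediv, add_zero, zero_add] at h
    rw [show sumdiv K ([] : List Int) = 0 from rfl, sub_zero] at h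
    set st := arr.foldl bStep ([], 0) with hst
    by_cases h2 : st.2 ≠ 0
    · rw [if_pos h2,
        show (List.foldl (fun acc L => acc + PySem.Int.floordiv L K) 0 (st.1 ++ [st.2]))
          = sumdiv K (st.1 ++ [st.2]) from rfl,
        sumdiv_append, PySem.Int.floordiv_eq_ediv_of_pos hK, h]
    · push_neg at h2
      rw [if_neg (by simp [h2]), h, h2]
      simp [sumdiv]
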